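-- pv_equiv track=rewrite | github.com/aimacode/aima-python | submissions/Carei/mySearches.py | prettyPrint
-- ===== SOURCE A (Python) =====
-- def prettyPrint(state):
--     output = ''
--     rowSeparator = ''
--     for row in state.split('|'):
--         output += rowSeparator
--         cellSeparator = ''
--         for cell in row.split(','):
--             output += cellSeparator
--             output += cell
--             cellSeparator = ' '
--         rowSeparator = '\n'
--     return output
-- ===== SOURCE B (Python) =====
-- def prettyPrint(state):
--     return state.replace('|', '\n').replace(',', ' ')
-- ===== Notes on version B (the rewrite author's own statement) =====
-- stated objective: simpler
-- what changed: Replaces the nested split/accumulate-with-separator loops by two direct character substitutions (replace '|'->newline, ','->space), building no intermediate token lists.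
import Mathlib
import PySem

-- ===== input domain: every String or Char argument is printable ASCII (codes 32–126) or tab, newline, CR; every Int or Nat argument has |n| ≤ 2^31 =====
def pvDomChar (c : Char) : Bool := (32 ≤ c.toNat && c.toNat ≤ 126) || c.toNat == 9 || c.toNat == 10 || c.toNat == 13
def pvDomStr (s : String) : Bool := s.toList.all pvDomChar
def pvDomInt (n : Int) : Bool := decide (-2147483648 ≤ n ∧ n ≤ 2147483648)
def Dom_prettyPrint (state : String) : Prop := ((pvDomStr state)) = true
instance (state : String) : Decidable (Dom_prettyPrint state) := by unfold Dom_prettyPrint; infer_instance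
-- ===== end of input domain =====

-- B replaces A's nested split/accumulate-with-separator loops by two direct character
-- substitutions; objective: simpler (same O(n) cost).

-- ===== PORT A =====
-- state.split('|') / row.split(',') with nonempty literal separators are exact as
-- PySem.Chars.splitOn on the character list; the two accumulator loops (output,
-- rowSeparator / cellSeparator) become folds over the same state.
def prettyPrint (state : String) : String :=
  let r := (PySem.Chars.splitOn state.toList ['|']).foldl
    (fun (st : List Char × List Char) row =>
      let out1 := st.1 ++ st.2                     -- output += rowSeparator
      let inner := (PySem.Chars.splitOn row [',']).foldl
        (fun (st2 : List Char × List Char) cell =>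
          (st2.1 ++ st2.2 ++ cell, [' ']))         -- output += cellSeparator + cell; cellSeparator = ' '
        (out1, ([] : List Char))
      (inner.1, ['\n']))                           -- rowSeparator = '\n'
    (([] : List Char), ([] : List Char))
  String.ofList r.1

-- ===== PORT B =====
def prettyPrint_alt (state : String) : String :=
  PySem.Str.replace (PySem.Str.replace state "|" "\n") "," " "

-- ===== PRECONDITION & SPEC =====
def Spec_prettyPrint (state : String) (out : String) : Prop := out = prettyPrint_alt state
instance (state : String) (out : String) : Decidable (Spec_prettyPrint state out) := by unfold Spec_prettyPrint; infer_instance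

-- ===== CLAIM (what is proved, stated in full; the proofs are below) =====
def Claim_equal_prettyPrint : Prop := ∀ (state : String), Dom_prettyPrint state → Spec_prettyPrint state (prettyPrint state)

-- ===== LEMMAS AND PROOFS =====

-- character substitution: what a single-char replace does pointwise
def pvSwap (o n c : Char) : Char := if c = o then n else c

-- reference single-char splitter (proof-side model of split on one character)
def pvSpl (o : Char) : List Char → List (List Char)
  | [] => [[]]
  | c :: t =>
    if c = o then [] :: pvSpl o t
    else
      match pvSpl o t with
      | [] => [[c]]
      | h :: r => (c :: h) :: r

theorem pvSpl_ne_nil (o : Char) (l : List Char) : pvSpl o l ≠ [] := by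
  induction l with
  | nil => simp [pvSpl]
  | cons c t ih =>
    simp only [pvSpl]
    split
    · simp
    · cases h : pvSpl o t <;> simp

theorem splitOn_go_single (o : Char) (fuel : Nat) (l cur : List Char)
    (acc : List (List Char)) (hf : l.length ≤ fuel) :
    PySem.Chars.splitOn.go [o] fuel l cur acc =
      acc.reverse ++
        (match pvSpl o l with
         | [] => [cur.reverse]
         | h :: t => (cur.reverse ++ h) :: t) := by
  induction fuel generalizing l cur acc with
  | zero =>
    have : l = [] := by cases l <;> simp_all
    subst this
    simp [PySem.Chars.splitOn.go, pvSpl]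
  | succ fuel ih =>
    cases l with
    | nil => simp [PySem.Chars.splitOn.go, pvSpl]
    | cons c t =>
      have hpre : List.isPrefixOf [o] (c :: t) = (o == c) := by
        simp [List.isPrefixOf]
      by_cases hc : c = o
      · subst hc
        simp only [PySem.Chars.splitOn.go, hpre, beq_self_eq_true, if_true]
        rw [show List.drop [c].length (c :: t) = t from rfl]
        rw [ih t [] (cur.reverse :: acc) (by simpa using Nat.le_of_succ_le_succ hf)]
        cases h : pvSpl c t with
        | nil => exact absurd h (pvSpl_ne_nil c t)
        | cons hh tt => simp [pvSpl, h]
      · have hne : ¬ ((o == c) = true) := by simp [Ne.symm hc]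
        simp only [PySem.Chars.splitOn.go, hpre, if_neg hne]
        rw [ih t (c :: cur) acc (by simpa using Nat.le_of_succ_le_succ hf)]
        cases h : pvSpl o t with
        | nil => exact absurd h (pvSpl_ne_nil o t)
        | cons hh tt => simp [pvSpl, hc, h]

theorem splitOn_single (o : Char) (l : List Char) :
    PySem.Chars.splitOn l [o] = pvSpl o l := by
  rw [PySem.Chars.splitOn]
  rw [splitOn_go_single o (l.length + 1) l [] [] (by omega)]
  cases h : pvSpl o l with
  | nil => exact absurd h (pvSpl_ne_nil o l)
  | cons hh tt => simp

theorem replace_go_single (o n : Char) (fuel : Nat) (l acc : List Char)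
    (hf : l.length ≤ fuel) :
    PySem.Chars.replace.go [o] [n] fuel l acc =
      acc.reverse ++ l.map (pvSwap o n) := by
  induction fuel generalizing l acc with
  | zero =>
    have : l = [] := by cases l <;> simp_all
    subst this
    simp [PySem.Chars.replace.go]
  | succ fuel ih =>
    cases l with
    | nil => simp [PySem.Chars.replace.go]
    | cons c t =>
      have hpre : List.isPrefixOf [o] (c :: t) = (o == c) := by
        simp [List.isPrefixOf]
      by_cases hc : c = o
      · subst hc
        simp only [PySem.Chars.replace.go, hpre, beq_self_eq_true, if_true]
        rw [show List.drop [c].length (c :: t) = t from rfl]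
        rw [ih t ([n].reverse ++ acc) (by simpa using Nat.le_of_succ_le_succ hf)]
        simp [pvSwap]
      · have hne : ¬ ((o == c) = true) := by simp [Ne.symm hc]
        simp only [PySem.Chars.replace.go, hpre, if_neg hne]
        rw [ih t (c :: acc) (by simpa using Nat.le_of_succ_le_succ hf)]
        simp [pvSwap, hc]

theorem replace_single (o n : Char) (l : List Char) :
    PySem.Chars.replace l [o] [n] = l.map (pvSwap o n) := by
  rw [PySem.Chars.replace]
  simp only [List.isEmpty_cons, if_false, Bool.false_eq_true]
  rw [replace_go_single o n l.length l [] (le_refl _)]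
  simp

-- join of the single-char split with a single-char separator is the pointwise swap
theorem join_pvSpl (o n : Char) (l : List Char) :
    (match pvSpl o l with
     | [] => []
     | h :: t => h ++ t.flatMap (fun x => n :: x)) = l.map (pvSwap o n) := by
  induction l with
  | nil => simp [pvSpl]
  | cons c t ih =>
    by_cases hc : c = o
    · subst hc
      cases h : pvSpl c t with
      | nil => exact absurd h (pvSpl_ne_nil c t)
      | cons hh tt =>
        rw [h] at ih
        simp only [pvSpl, h, List.map_cons]
        simp [pvSwap, ← ih]
    · cases h : pvSpl o t with
      | nil => exact absurd h (pvSpl_ne_nil o t)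
      | cons hh tt =>
        rw [h] at ih
        simp only [pvSpl, if_neg hc, h, List.map_cons]
        simp only [pvSwap, if_neg hc]
        simp [← ih]

theorem inner_foldl_sep (chunks : List (List Char)) (out : List Char) :
    List.foldl
      (fun (st2 : List Char × List Char) cell => (st2.1 ++ st2.2 ++ cell, [' ']))
      (out, [' ']) chunks
      = (out ++ chunks.flatMap (fun x => ' ' :: x), [' ']) := by
  induction chunks generalizing out with
  | nil => simp
  | cons h t ih =>
    rw [List.foldl_cons]
    rw [show (((out, [' ']) : List Char × List Char).1 ++ (out, [' ']).2 ++ h, ([' '] : List Char))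
          = (out ++ [' '] ++ h, [' ']) from rfl]
    rw [ih]
    simp

theorem inner_foldl (row out : List Char) :
    List.foldl
      (fun (st2 : List Char × List Char) cell => (st2.1 ++ st2.2 ++ cell, [' ']))
      (out, []) (PySem.Chars.splitOn row [','])
      = (out ++ row.map (pvSwap ',' ' '), [' ']) := by
  rw [splitOn_single]
  cases h : pvSpl ',' row with
  | nil => exact absurd h (pvSpl_ne_nil ',' row)
  | cons hh tt =>
    have hj := join_pvSpl ',' ' ' row
    rw [h] at hj
    simp only [List.foldl_cons, List.append_nil]
    rw [inner_foldl_sep]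
    simp [← hj]

theorem outer_foldl_sep (rows : List (List Char)) (out : List Char) :
    List.foldl
      (fun (st : List Char × List Char) row =>
        let out1 := st.1 ++ st.2
        let inner := (PySem.Chars.splitOn row [',']).foldl
          (fun (st2 : List Char × List Char) cell =>
            (st2.1 ++ st2.2 ++ cell, [' ']))
          (out1, ([] : List Char))
        (inner.1, ['\n']))
      (out, ['\n']) rows
      = (out ++ rows.flatMap (fun r => '\n' :: r.map (pvSwap ',' ' ')), ['\n']) := by
  induction rows generalizing out with
  | nil => simp
  | cons r t ih =>
    simp only [List.foldl_cons]
    rw [show ((out, ['\n']) : List Char × List Char).1 ++ (out, ['\n']).2 = out ++ ['\n'] from rfl]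
    rw [inner_foldl r (out ++ ['\n'])]
    rw [ih]
    simp

theorem main_list (s : List Char) :
    ((PySem.Chars.splitOn s ['|']).foldl
      (fun (st : List Char × List Char) row =>
        let out1 := st.1 ++ st.2
        let inner := (PySem.Chars.splitOn row [',']).foldl
          (fun (st2 : List Char × List Char) cell =>
            (st2.1 ++ st2.2 ++ cell, [' ']))
          (out1, ([] : List Char))
        (inner.1, ['\n']))
      (([] : List Char), ([] : List Char))).1
    = (s.map (pvSwap '|' '\n')).map (pvSwap ',' ' ') := by
  rw [splitOn_single]
  cases h : pvSpl '|' s with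
  | nil => exact absurd h (pvSpl_ne_nil '|' s)
  | cons hh tt =>
    have hj := join_pvSpl '|' '\n' s
    rw [h] at hj
    simp only [List.foldl_cons]
    rw [show ((([] : List Char), ([] : List Char)) : List Char × List Char).1 ++ (([] : List Char), ([] : List Char)).2 = ([] : List Char) from rfl]
    rw [inner_foldl hh []]
    simp only [List.nil_append]
    rw [outer_foldl_sep]
    rw [← hj]
    simp [List.map_flatMap, pvSwap]

-- ===== VERDICT (by name: the statement is the Claim_ definition above) =====
theorem prettyPrint_spec : Claim_equal_prettyPrint := by
  intro state _
  unfold Spec_prettyPrint prettyPrint prettyPrint_alt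
  refine String.toList_inj.mp ?_
  simp only [PySem.Str.toList_replace, String.toList_ofList]
  rw [show ("|" : String).toList = ['|'] from rfl,
      show ("\n" : String).toList = ['\n'] from rfl,
      show ("," : String).toList = [','] from rfl,
      show (" " : String).toList = [' '] from rfl]
  rw [replace_single, replace_single]
  exact main_list state.toList
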